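-- pv_equiv track=rewrite | github.com/lawang24/competitive-programming-archive | Codeforces/old_code/div2/round_166/D.py | solve
-- ===== SOURCE A (Python) =====
-- import collections
--
-- def solve(word):
--     lp_count = [1 for _ in range(len(word))]
--     rp_count = [1 for _ in range(len(word))]
--     ans = 0
--
--     count = collections.defaultdict(list)
--
--     for i in range(len(word)-2, -1, -1):
--         if word[i] == ")":
--             rp_count[i] = rp_count[i+1]+1
--         else:
--             rp_count[i] = rp_count[i+1]-1
--
--     for i in range(1,len(word)):
--         if word[i] == "(":
--             lp_count[i] = lp_count[i-1]+1
--         else: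
--             lp_count[i] = lp_count[i-1]-1
--
--         if count[lp_count[i]]:
--             for idx in count[lp_count[i]]:
--                 if rp_count[idx+1]-rp_count[i]>=lp_count[idx]:
--                     ans+=1
--
--         count[lp_count[i]].append(i)
--
--     return ans
-- ===== SOURCE B (Python) =====
-- import bisect
--
-- def solve(word):
--     n = len(word)
--     if n < 2:
--         return 0
--     # carry the suffix balance rp as a running value instead of building an array:
--     # rp[0] = 1 + #close - #other over word[:n-1];  rp[i+1] = rp[i] - (1 if word[i] == ")" else -1)
--     close = word.count(")", 0, n - 1)
--     r = 1 + 2 * close - (n - 1)                  # rp[0]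
--     r -= 1 if word[0] == ")" else -1             # r = rp[1]
--     ans = 0
--     groups = {}                                  # lp balance -> sorted list of rp[idx+1]
--     lp = 1
--     bl = bisect.bisect_left
--     ins = bisect.insort
--     for i in range(1, n - 1):                    # query, then insert rp[i+1]
--         c = word[i]
--         lp += 1 if c == "(" else -1
--         rn = r - (1 if c == ")" else -1)         # rp[i+1]
--         lst = groups.get(lp)
--         if lst is None:
--             groups[lp] = [rn]
--         else:
--             ans += len(lst) - bl(lst, r + lp)
--             ins(lst, rn)
--         r = rn
--     c = word[n - 1]                             # i = n-1: query only
--     lp += 1 if c == "(" else -1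
--     lst = groups.get(lp)
--     if lst:
--         ans += len(lst) - bl(lst, r + lp)
--     return ans
-- ===== Notes on version B (the rewrite author's own statement) =====
-- stated objective: faster
-- what changed: A scans, for every position i, the whole list of earlier indices with the same prefix balance; B keeps per-balance sorted lists of the suffix values rp[idx+1], answers each position with one bisect, and carries the suffix balance as a running value instead of building arrays.
import Mathlib
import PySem

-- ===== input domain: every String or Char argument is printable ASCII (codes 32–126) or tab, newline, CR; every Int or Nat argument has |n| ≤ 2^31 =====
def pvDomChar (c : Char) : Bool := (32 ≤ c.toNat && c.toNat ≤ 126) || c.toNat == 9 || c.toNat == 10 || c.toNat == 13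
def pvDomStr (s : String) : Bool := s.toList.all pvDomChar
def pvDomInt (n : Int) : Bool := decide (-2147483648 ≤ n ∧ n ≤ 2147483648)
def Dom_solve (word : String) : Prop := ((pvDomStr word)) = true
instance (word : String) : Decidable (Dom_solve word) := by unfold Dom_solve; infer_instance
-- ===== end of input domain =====

-- B replaces A's inner scan over all earlier same-balance indices by per-balance sorted lists
-- queried with bisect, and carries the suffix balance as a running value instead of an array.

-- ===== PORT A =====
-- A's suffix array rp_count: rp[n-1] = 1, rp[i] = rp[i+1] ± 1
def rpList : List Char → List Int
  | [] => []
  | [_] => [1]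
  | c :: rest => ((rpList rest).headD 0 + (if c = ')' then 1 else -1)) :: rpList rest

-- one iteration of A's main loop; state = (lp_count array, ans, count dict).
-- every index the Python reads (word[i], lp_count[i-1], lp_count[idx], rp_count[idx+1], rp_count[i])
-- is in range during the loop, so getD's default is never read.
def stepA (w : List Char) (rp : List Int) : (List Int × Int × PySem.Dict Int (List Int)) → Int → (List Int × Int × PySem.Dict Int (List Int))
  | (lp, ans, cnt), i =>
    let c := w.getD i.toNat ' '
    let v := if c = '(' then lp.getD (i-1).toNat 0 + 1 else lp.getD (i-1).toNat 0 - 1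
    let lp' := lp.set i.toNat v
    let lst := cnt.getD v []
    let ans' := if lst = [] then ans
      else lst.foldl (fun a idx => if rp.getD (idx+1).toNat 0 - rp.getD i.toNat 0 ≥ lp'.getD idx.toNat 0 then a + 1 else a) ans
    (lp', ans', cnt.insert v (lst ++ [i]))

def solve (word : String) : Int :=
  let w := word.toList
  let n : Int := PySem.List.len w
  let rp := rpList w
  ((PySem.List.pyRange 1 n 1).foldl (stepA w rp) (List.replicate w.length (1 : Int), 0, PySem.Dict.empty)).2.1

-- ===== PORT B =====
-- one iteration of B's loop (i = 1 .. n-2); state = (lp, r = rp[i], ans, groups dict).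
def stepB (w : List Char) : (Int × Int × Int × PySem.Dict Int (List Int)) → Int → (Int × Int × Int × PySem.Dict Int (List Int))
  | (lp, r, ans, grp), i =>
    let c := w.getD i.toNat ' '
    let lp' := lp + (if c = '(' then 1 else -1)
    let rn := r - (if c = ')' then 1 else -1)
    match grp.get? lp' with
    | none => (lp', rn, ans, grp.insert lp' [rn])
    | some lst =>
        (lp', rn, ans + ((lst.length : Int) - (PySem.List.bisectLeft lst (r + lp') : Int)),
         grp.insert lp' (List.orderedInsert (· ≤ ·) rn lst))

-- Source B's query-only last iteration (i = n-1), after the loop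
def lastB (w : List Char) (st : Int × Int × Int × PySem.Dict Int (List Int)) : Int :=
  let c := w.getD (w.length - 1) ' '
  let lp' := st.1 + (if c = '(' then 1 else -1)
  let lst := st.2.2.2.getD lp' []
  if lst = [] then st.2.2.1
  else st.2.2.1 + ((lst.length : Int) - (PySem.List.bisectLeft lst (st.2.1 + lp') : Int))

def solve_alt (word : String) : Int :=
  let w := word.toList
  let n : Int := PySem.List.len w
  if n < 2 then 0
  else
    let close : Int := ((w.take (n - 1).toNat).count ')' : Int)
    let r0 := 1 + 2 * close - (n - 1)
    let r1 := r0 - (if w.getD 0 ' ' = ')' then 1 else -1)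
    lastB w ((PySem.List.pyRange 1 (n - 1) 1).foldl (stepB w) (1, r1, 0, PySem.Dict.empty))

-- ===== PRECONDITION & SPEC =====
def Spec_solve (word : String) (out : Int) : Prop := out = solve_alt word
instance (word : String) (out : Int) : Decidable (Spec_solve word out) := by unfold Spec_solve; infer_instance

-- ===== CLAIM (what is proved, stated in full; the proofs are below) =====
def Claim_equal_solve : Prop := ∀ (word : String), Dom_solve word → Spec_solve word (solve word)

-- ===== LEMMAS AND PROOFS =====

-- in a sorted list, "len(lst) - bisect_left(lst, t)" counts the elements ≥ t
theorem count_ge_bisect (lst : List Int) (t : Int) (h : lst.Pairwise (· ≤ ·)) :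
    (lst.length : Int) - (PySem.List.bisectLeft lst t : Int)
      = (lst.countP (fun x => decide (t ≤ x)) : Int) := by
  obtain ⟨hk, hlt, hge⟩ := PySem.List.bisectLeft_spec lst t h
  set k := PySem.List.bisectLeft lst t with hkdef
  have hsplit : lst.countP (fun x => decide (t ≤ x))
      = (lst.take k).countP (fun x => decide (t ≤ x)) + (lst.drop k).countP (fun x => decide (t ≤ x)) := by
    conv_lhs => rw [← List.take_append_drop k lst]
    rw [List.countP_append]
  have h1 : (lst.take k).countP (fun x => decide (t ≤ x)) = 0 := by
    rw [List.countP_eq_zero]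
    intro a ha
    rw [List.mem_take_iff_getElem] at ha
    obtain ⟨j, hj, he⟩ := ha
    have := hlt j (by omega) (by omega)
    subst he
    simp only [decide_eq_true_eq]
    omega
  have h2 : (lst.drop k).countP (fun x => decide (t ≤ x)) = (lst.drop k).length := by
    rw [List.countP_eq_length]
    intro a ha
    rw [List.mem_drop_iff_getElem] at ha
    obtain ⟨j, hj, he⟩ := ha
    have := hge (k + j) (by omega) (by omega)
    subst he
    simp only [decide_eq_true_eq]
    omega
  rw [hsplit, h1, h2, List.length_drop]
  omega

theorem getD_set_ne (l : List Int) (m k : Nat) (a d : Int) (h : m ≠ k) : (l.set m a).getD k d = l.getD k d := by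
  simp [List.getD, List.getElem?_set_ne h]

theorem getD_set_self (l : List Int) (m : Nat) (a d : Int) (h : m < l.length) : (l.set m a).getD m d = a := by
  simp [List.getD, h]

theorem rpList_length (w : List Char) : (rpList w).length = w.length := by
  induction w with
  | nil => simp [rpList]
  | cons c rest ih =>
    cases rest with
    | nil => simp [rpList]
    | cons d t => simp only [rpList, List.length_cons] at *; omega

-- the recurrence rp[j] = rp[j+1] + δ(word[j]) of both Pythons, read off rpList
theorem rpList_succ (w : List Char) (j : Nat) (h : j + 1 < w.length) :
    (rpList w).getD j 0 = (rpList w).getD (j+1) 0 + (if w.getD j ' ' = ')' then 1 else -1) := by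
  induction w generalizing j with
  | nil => simp at h
  | cons c rest ih =>
    cases rest with
    | nil => simp at h
    | cons d t =>
      cases j with
      | zero =>
        have hlen : (rpList (d :: t)).length = (d :: t).length := rpList_length _
        obtain ⟨x, xs, hx⟩ : ∃ x xs, rpList (d :: t) = x :: xs := by
          cases hrp : rpList (d :: t) with
          | nil => rw [hrp] at hlen; simp at hlen
          | cons x xs => exact ⟨x, xs, rfl⟩
        simp [rpList, hx]
      | succ j' =>
        have := ih j' (by simpa using Nat.lt_of_succ_lt_succ h)
        simpa [rpList] using this
-- closed form for rp[0] used by B's initialisation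
theorem rpList_zero (w : List Char) (h : w ≠ []) :
    (rpList w).getD 0 0 = 1 + 2 * ((w.take (w.length - 1)).count ')' : Int) - ((w.length : Int) - 1) := by
  induction w with
  | nil => exact absurd rfl h
  | cons c rest ih =>
    cases rest with
    | nil => simp [rpList]
    | cons d t =>
      have hlen : (rpList (d :: t)).length = (d :: t).length := rpList_length _
      obtain ⟨x, xs, hx⟩ : ∃ x xs, rpList (d :: t) = x :: xs := by
        cases hrp : rpList (d :: t) with
        | nil => rw [hrp] at hlen; simp at hlen
        | cons x xs => exact ⟨x, xs, rfl⟩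
      have ihv := ih (by simp)
      rw [hx] at ihv
      simp only [rpList, hx, List.getD_cons_zero, List.headD_cons, List.length_cons,
        Nat.add_sub_cancel, List.take_succ_cons, List.count_cons] at *
      by_cases hc : c = ')'
      · simp only [hc, beq_self_eq_true, if_true]
        push_cast
        omega
      · have hb : (c == ')') = false := by simpa using hc
        simp only [hb, if_neg hc]
        push_cast
        omega

-- A's step, rewritten: the inner scan over count[v] is a countP (all its members have lp_count[idx] = v)
theorem stepA_eq (w : List Char) (rp lp : List Int) (ansv i : Int) (cnt : PySem.Dict Int (List Int))
    (v : Int) (hv : v = (if w.getD i.toNat ' ' = '(' then lp.getD (i-1).toNat 0 + 1 else lp.getD (i-1).toNat 0 - 1))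
    (hmem : ∀ idx ∈ cnt.getD v [], (lp.set i.toNat v).getD idx.toNat 0 = v) :
    stepA w rp (lp, ansv, cnt) i =
      (lp.set i.toNat v,
       ansv + ((cnt.getD v []).countP (fun idx => decide (rp.getD i.toNat 0 + v ≤ rp.getD (idx+1).toNat 0)) : Int),
       cnt.insert v (cnt.getD v [] ++ [i])) := by
  simp only [stepA]
  rw [← hv]
  congr 1
  congr 1
  by_cases hl : cnt.getD v [] = []
  · rw [if_pos hl, hl]
    simp
  · rw [if_neg hl, PySem.List.foldl_ite_add_one]
    congr 1
    exact_mod_cast List.countP_congr (fun x hx => by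
      rw [hmem x hx]
      simp only [ge_iff_le, decide_eq_true_eq]
      omega)

-- the count A adds at position i equals the count B reads off its sorted group list
theorem count_transfer (w : List Char) (cnt grp : PySem.Dict Int (List Int)) (v t : Int)
    (hperm : (grp.getD v []).Perm ((cnt.getD v []).map (fun idx => (rpList w).getD (idx+1).toNat 0))) :
    ((grp.getD v []).countP (fun x => decide (t ≤ x)) : Int)
      = ((cnt.getD v []).countP (fun idx => decide (t ≤ (rpList w).getD (idx+1).toNat 0)) : Int) := by
  rw [hperm.countP_eq, List.countP_map]
  rfl

-- the last position i = n-1: A runs one more dict-scan iteration, B runs its query-only epilogue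
theorem final_step_eq (w : List Char) (i ansv lpB r : Int) (lp : List Int)
    (cnt grp : PySem.Dict Int (List Int))
    (hi : 1 ≤ i) (hieq : i = (w.length : Int) - 1)
    (hlen : lp.length = w.length)
    (hlpB : lpB = lp.getD (i-1).toNat 0)
    (hr : r = (rpList w).getD i.toNat 0)
    (h4 : ∀ v idx, idx ∈ cnt.getD v [] → 1 ≤ idx ∧ idx < i ∧ lp.getD idx.toNat 0 = v)
    (h5 : ∀ v, (grp.getD v []).Pairwise (· ≤ ·))
    (h6 : ∀ v, (grp.getD v []).Perm ((cnt.getD v []).map (fun idx => (rpList w).getD (idx+1).toNat 0))) :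
    ((PySem.List.pyRange i (w.length : Int) 1).foldl (stepA w (rpList w)) (lp, ansv, cnt)).2.1
      = lastB w ((PySem.List.pyRange i ((w.length : Int) - 1) 1).foldl (stepB w) (lpB, r, ansv, grp)) := by
  have hBnil : PySem.List.pyRange i ((w.length : Int) - 1) 1 = [] := PySem.List.pyRange_one_eq_nil (by omega)
  have hAone : PySem.List.pyRange i (w.length : Int) 1 = [i] := by
    rw [PySem.List.pyRange_one_cons (by omega), PySem.List.pyRange_one_eq_nil (by omega)]
  rw [hBnil, hAone, List.foldl_cons, List.foldl_nil, List.foldl_nil]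
  have hvB : (if w.getD i.toNat ' ' = '(' then lp.getD (i-1).toNat 0 + 1 else lp.getD (i-1).toNat 0 - 1)
      = lpB + (if w.getD i.toNat ' ' = '(' then 1 else -1) := by
    rw [hlpB]; split <;> ring
  set v := (if w.getD i.toNat ' ' = '(' then lp.getD (i-1).toNat 0 + 1 else lp.getD (i-1).toNat 0 - 1) with hvdef
  have hitoNat : i.toNat < lp.length := by omega
  have hmem : ∀ idx ∈ cnt.getD v [], (lp.set i.toNat v).getD idx.toNat 0 = v := by
    intro idx hidx
    obtain ⟨ha, hb, hc⟩ := h4 v idx hidx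
    rw [getD_set_ne _ _ _ _ _ (by omega)]
    exact hc
  rw [stepA_eq w (rpList w) lp ansv i cnt v hvdef hmem]
  simp only [lastB]
  have hidx : w.length - 1 = i.toNat := by omega
  rw [hidx, ← hvB]
  by_cases hl : grp.getD v [] = []
  · rw [if_pos hl]
    have hmap : (cnt.getD v []).map (fun idx => (rpList w).getD (idx+1).toNat 0) = [] := by
      have := h6 v
      rw [hl] at this
      exact (this.symm).eq_nil
    have hcnil : cnt.getD v [] = [] := List.map_eq_nil_iff.mp hmap
    rw [hcnil]
    simp
  · rw [if_neg hl]
    congr 1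
    rw [count_ge_bisect _ _ (h5 v), hr]
    exact (count_transfer w cnt grp v _ (h6 v)).symm

-- main loop invariant, carried from iteration i to the end: equal answers; B's lp is A's
-- lp_count[i-1]; B's r is rp[i]; every idx stored under key v has lp_count[idx] = v and 1 ≤ idx < i;
-- B's group lists are sorted permutations of the rp[idx+1] values of A's index lists.
theorem loop_eq (w : List Char) :
    ∀ (k : Nat) (i ansv lpB r : Int) (lp : List Int) (cnt grp : PySem.Dict Int (List Int)),
    1 ≤ i →
    i ≤ (w.length : Int) - 1 →
    (w.length : Int) - 1 - i ≤ k →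
    lp.length = w.length →
    lpB = lp.getD (i-1).toNat 0 →
    r = (rpList w).getD i.toNat 0 →
    (∀ v idx, idx ∈ cnt.getD v [] → 1 ≤ idx ∧ idx < i ∧ lp.getD idx.toNat 0 = v) →
    (∀ v, (grp.getD v []).Pairwise (· ≤ ·)) →
    (∀ v, (grp.getD v []).Perm ((cnt.getD v []).map (fun idx => (rpList w).getD (idx+1).toNat 0))) →
    (∀ v, grp.get? v = none → cnt.getD v [] = []) →
    ((PySem.List.pyRange i (w.length : Int) 1).foldl (stepA w (rpList w)) (lp, ansv, cnt)).2.1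
      = lastB w ((PySem.List.pyRange i ((w.length : Int) - 1) 1).foldl (stepB w) (lpB, r, ansv, grp)) := by
  intro k
  induction k with
  | zero =>
    intro i ansv lpB r lp cnt grp hi hiub hk hlen hlpB hr h4 h5 h6 h7
    have hieq : i = (w.length : Int) - 1 := by omega
    exact final_step_eq w i ansv lpB r lp cnt grp hi hieq hlen hlpB hr h4 h5 h6
  | succ k ih =>
    intro i ansv lpB r lp cnt grp hi hiub hk hlen hlpB hr h4 h5 h6 h7
    by_cases hlast : i = (w.length : Int) - 1
    · exact final_step_eq w i ansv lpB r lp cnt grp hi hlast hlen hlpB hr h4 h5 h6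
    · have hin : i < (w.length : Int) - 1 := by omega
      rw [PySem.List.pyRange_one_cons (by omega), PySem.List.pyRange_one_cons hin,
          List.foldl_cons, List.foldl_cons]
      have hvB : (if w.getD i.toNat ' ' = '(' then lp.getD (i-1).toNat 0 + 1 else lp.getD (i-1).toNat 0 - 1)
          = lpB + (if w.getD i.toNat ' ' = '(' then 1 else -1) := by
        rw [hlpB]; split <;> ring
      set v := (if w.getD i.toNat ' ' = '(' then lp.getD (i-1).toNat 0 + 1 else lp.getD (i-1).toNat 0 - 1) with hvdef
      have hitoNat : i.toNat < lp.length := by omega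
      have hmem : ∀ idx ∈ cnt.getD v [], (lp.set i.toNat v).getD idx.toNat 0 = v := by
        intro idx hidx
        obtain ⟨ha, hb, hc⟩ := h4 v idx hidx
        rw [getD_set_ne _ _ _ _ _ (by omega)]
        exact hc
      -- the value B inserts is rp[i+1]
      have hrn : r - (if w.getD i.toNat ' ' = ')' then 1 else -1) = (rpList w).getD (i+1).toNat 0 := by
        have hrec := rpList_succ w i.toNat (by omega)
        have h1 : (i+1).toNat = i.toNat + 1 := by omega
        rw [hr, h1, hrec]
        ring
      rw [stepA_eq w (rpList w) lp ansv i cnt v hvdef hmem]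
      -- invariant obligations shared by both stepB branches
      have hlen' : (lp.set i.toNat v).length = w.length := by simp [hlen]
      have hlpB' : v = (lp.set i.toNat v).getD ((i+1)-1).toNat 0 := by
        have : (i + 1 - 1) = i := by ring
        rw [this, getD_set_self _ _ _ _ hitoNat]
      have h4' : ∀ v' idx, idx ∈ (cnt.insert v (cnt.getD v [] ++ [i])).getD v' [] →
          1 ≤ idx ∧ idx < i + 1 ∧ (lp.set i.toNat v).getD idx.toNat 0 = v' := by
        intro v' idx hidx
        by_cases hv' : v' = v
        · subst hv'
          rw [PySem.Dict.getD_insert_self] at hidx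
          rcases List.mem_append.mp hidx with hold | hnew
          · obtain ⟨ha, hb, hc⟩ := h4 v idx hold
            exact ⟨ha, by omega, by rw [getD_set_ne _ _ _ _ _ (by omega)]; exact hc⟩
          · have : idx = i := by simpa using hnew
            subst this
            exact ⟨hi, by omega, getD_set_self _ _ _ _ hitoNat⟩
        · rw [PySem.Dict.getD_insert_of_ne _ _ _ hv'] at hidx
          obtain ⟨ha, hb, hc⟩ := h4 v' idx hidx
          exact ⟨ha, by omega, by rw [getD_set_ne _ _ _ _ _ (by omega)]; exact hc⟩
      -- now split on B's dictionary lookup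
      rcases hget : grp.get? v with _ | lst
      · -- key v unseen: A's list under v is empty, B starts a fresh one-element list
        have hempty : cnt.getD v [] = [] := h7 v hget
        have hBstep : stepB w (lpB, r, ansv, grp) i
            = (v, r - (if w.getD i.toNat ' ' = ')' then 1 else -1), ansv,
               grp.insert v [r - (if w.getD i.toNat ' ' = ')' then 1 else -1)]) := by
          simp only [stepB, ← hvB, hget]
        rw [hBstep]
        have hc0 : ((cnt.getD v []).countP (fun idx => decide ((rpList w).getD i.toNat 0 + v ≤ (rpList w).getD (idx+1).toNat 0)) : Int) = 0 := by
          rw [hempty]; simp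
        rw [hc0, add_zero]
        apply ih (i+1) ansv v _ _ _ _ (by omega) (by omega) (by omega) hlen' hlpB' hrn h4'
        · intro v'
          by_cases hv' : v' = v
          · subst hv'; rw [PySem.Dict.getD_insert_self]; simp
          · rw [PySem.Dict.getD_insert_of_ne _ _ _ hv']; exact h5 v'
        · intro v'
          by_cases hv' : v' = v
          · subst hv'
            rw [PySem.Dict.getD_insert_self, PySem.Dict.getD_insert_self, hempty]
            rw [hrn]
            simp
          · rw [PySem.Dict.getD_insert_of_ne _ _ _ hv', PySem.Dict.getD_insert_of_ne _ _ _ hv']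
            exact h6 v'
        · intro v' hnone
          by_cases hv' : v' = v
          · subst hv'; rw [PySem.Dict.get?_insert_self] at hnone; exact absurd hnone (by simp)
          · rw [PySem.Dict.get?_insert_of_ne _ _ hv'] at hnone
            rw [PySem.Dict.getD_insert_of_ne _ _ _ hv']
            exact h7 v' hnone
      · -- key v present: B counts with bisect and inserts in order
        have hlst : grp.getD v [] = lst := PySem.Dict.getD_of_get?_eq_some grp [] hget
        have hBstep : stepB w (lpB, r, ansv, grp) i
            = (v, r - (if w.getD i.toNat ' ' = ')' then 1 else -1),
               ansv + ((lst.length : Int) - (PySem.List.bisectLeft lst (r + v) : Int)),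
               grp.insert v (List.orderedInsert (· ≤ ·) (r - (if w.getD i.toNat ' ' = ')' then 1 else -1)) lst)) := by
          simp only [stepB, ← hvB, hget]
        rw [hBstep]
        have hsort : lst.Pairwise (· ≤ ·) := by rw [← hlst]; exact h5 v
        have hcnt : (lst.length : Int) - (PySem.List.bisectLeft lst (r + v) : Int)
            = ((cnt.getD v []).countP (fun idx => decide ((rpList w).getD i.toNat 0 + v ≤ (rpList w).getD (idx+1).toNat 0)) : Int) := by
          rw [count_ge_bisect lst (r + v) hsort, hr]
          rw [← hlst]
          exact count_transfer w cnt grp v _ (h6 v)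
        rw [hcnt]
        apply ih (i+1) _ v _ _ _ _ (by omega) (by omega) (by omega) hlen' hlpB' hrn h4'
        · intro v'
          by_cases hv' : v' = v
          · subst hv'; rw [PySem.Dict.getD_insert_self]
            exact List.Pairwise.orderedInsert _ _ hsort
          · rw [PySem.Dict.getD_insert_of_ne _ _ _ hv']; exact h5 v'
        · intro v'
          by_cases hv' : v' = v
          · subst hv'
            rw [PySem.Dict.getD_insert_self, PySem.Dict.getD_insert_self, List.map_append]
            have hperm : lst.Perm ((cnt.getD v []).map (fun idx => (rpList w).getD (idx+1).toNat 0)) := by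
              rw [← hlst]; exact h6 v
            refine (List.perm_orderedInsert _ _ _).trans ?_
            rw [hrn]
            refine (hperm.cons _).trans ?_
            simp only [List.map_cons, List.map_nil]
            exact (List.perm_append_singleton _ _).symm
          · rw [PySem.Dict.getD_insert_of_ne _ _ _ hv', PySem.Dict.getD_insert_of_ne _ _ _ hv']
            exact h6 v'
        · intro v' hnone
          by_cases hv' : v' = v
          · subst hv'; rw [PySem.Dict.get?_insert_self] at hnone; exact absurd hnone (by simp)
          · rw [PySem.Dict.get?_insert_of_ne _ _ hv'] at hnone
            rw [PySem.Dict.getD_insert_of_ne _ _ _ hv']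
            exact h7 v' hnone

-- ===== VERDICT (by name: the statement is the Claim_ definition above) =====
theorem solve_spec : Claim_equal_solve := by
  unfold Claim_equal_solve Spec_solve
  intro word _
  simp only [solve, solve_alt, PySem.List.len_eq]
  by_cases h2 : (word.toList.length : Int) < 2
  · rw [if_pos h2, PySem.List.pyRange_one_eq_nil (by omega)]
    simp
  · rw [if_neg h2]
    apply loop_eq word.toList word.toList.length 1 0 1
    · omega
    · omega
    · omega
    · simp
    · have hpos : 0 < word.length := by
        have : 0 < word.toList.length := by omega
        simpa using this
      simp [List.getD, hpos]
    · -- r1 = rp[1] via the closed form for rp[0] and the recurrence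
      have hne : word.toList ≠ [] := by
        intro hnil
        rw [hnil] at h2
        simp at h2
      have h0 := rpList_zero word.toList hne
      have hrec := rpList_succ word.toList 0 (by omega)
      have htn : ((word.toList.length : Int) - 1).toNat = word.toList.length - 1 := by omega
      rw [htn, ← h0, hrec]
      have h1t : ((1 : Int)).toNat = (0 : Nat) + 1 := rfl
      rw [h1t]
      ring
    · intro v idx hidx
      simp [PySem.Dict.getD_empty] at hidx
    · intro v
      simp [PySem.Dict.getD_empty]
    · intro v
      simp [PySem.Dict.getD_empty]
    · intro v _
      rfl
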